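-- pv_equiv track=rewrite | github.com/lokeshtheprogrammer/SISA_hackthon | ai-secure-platform/core/input_router.py | _heuristic_type
-- ===== SOURCE A (Python) =====
-- def _heuristic_type(text: str, current: str) -> str:
--     """Guess type if text seems like SQL or logs."""
--     if current != "text": return current
--
--     up = text.upper()
--     if "SELECT" in up and "FROM" in up: return "sql"
--     if "INSERT" in up and "INTO" in up: return "sql"
--
--     # Log heuristic: Starts with date pattern
--     if any(text[:10].startswith(str(y)) for y in range(1990, 2030)):
--         return "log"
--
--     return "text"
-- ===== SOURCE B (Python) =====
-- def _heuristic_type(text: str, current: str) -> str: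
--     """Guess type if text seems like SQL or logs."""
--     if current != "text":
--         return current
--
--     up = text.upper()
--     if "SELECT" in up and "FROM" in up:
--         return "sql"
--     if "INSERT" in up and "INTO" in up:
--         return "sql"
--
--     # Log heuristic: parse the leading four characters as a year instead of
--     # scanning 40 candidate year strings.
--     p = text[:4]
--     if len(p) == 4 and p.isdigit():
--         year = (1000 * (ord(p[0]) - 48) + 100 * (ord(p[1]) - 48)
--                 + 10 * (ord(p[2]) - 48) + (ord(p[3]) - 48))
--         if 1990 <= year <= 2029:
--             return "log"
--
--     return "text"
-- ===== Notes on version B (the rewrite author's own statement) =====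
-- stated objective: simpler
-- what changed: The any(...) scan over the 40 year strings str(1990)..str(2029) is replaced by a closed-form parse of the leading four characters: if text[:4] is four ASCII digits, compute the year arithmetically and test 1990 <= year <= 2029.
import Mathlib
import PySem

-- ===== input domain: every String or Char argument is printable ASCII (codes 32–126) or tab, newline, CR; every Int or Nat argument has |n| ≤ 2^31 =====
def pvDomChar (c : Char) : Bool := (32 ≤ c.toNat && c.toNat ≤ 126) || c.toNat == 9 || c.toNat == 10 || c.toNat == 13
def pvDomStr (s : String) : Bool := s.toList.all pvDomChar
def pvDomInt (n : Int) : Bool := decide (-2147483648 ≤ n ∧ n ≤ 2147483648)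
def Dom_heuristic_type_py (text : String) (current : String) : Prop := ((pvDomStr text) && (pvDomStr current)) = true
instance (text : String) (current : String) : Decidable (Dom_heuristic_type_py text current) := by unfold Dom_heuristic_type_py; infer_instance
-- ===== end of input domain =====

-- B replaces A's any(...) scan over the 40 year strings by a closed-form parse of text[:4] (simpler); return value only.

-- ===== PORT A =====
def heuristic_type_py (text : String) (current : String) : String :=
  if current ≠ "text" then current
  else
    let up := PySem.Str.upper text
    if PySem.Str.isIn "SELECT" up && PySem.Str.isIn "FROM" up then "sql"
    else if PySem.Str.isIn "INSERT" up && PySem.Str.isIn "INTO" up then "sql"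
    else if (PySem.List.pyRange 1990 2030 1).any
        (fun y => PySem.Str.startswith (PySem.Str.slice text none (some 10)) (PySem.Int.toStr y)) then "log"
    else "text"

-- ===== PORT B =====
def heuristic_type_py_alt (text : String) (current : String) : String :=
  if current ≠ "text" then current
  else
    let up := PySem.Str.upper text
    if PySem.Str.isIn "SELECT" up && PySem.Str.isIn "FROM" up then "sql"
    else if PySem.Str.isIn "INSERT" up && PySem.Str.isIn "INTO" up then "sql"
    else
      match (PySem.Str.slice text none (some 4)).toList with
      | [a, b, c, d] =>
        if PySem.Chars.strIsdigit [a, b, c, d] then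
          let year : Int := 1000 * ((a.toNat : Int) - 48) + 100 * ((b.toNat : Int) - 48)
                            + 10 * ((c.toNat : Int) - 48) + ((d.toNat : Int) - 48)
          if 1990 ≤ year ∧ year ≤ 2029 then "log" else "text"
        else "text"
      | _ => "text"

-- ===== PRECONDITION & SPEC =====
def Spec_heuristic_type_py (text : String) (current : String) (out : String) : Prop := out = heuristic_type_py_alt text current
instance (text : String) (current : String) (out : String) : Decidable (Spec_heuristic_type_py text current out) := by unfold Spec_heuristic_type_py; infer_instance

-- ===== CLAIM (what is proved, stated in full; the proofs are below) =====
def Claim_equal_heuristic_type_py : Prop := ∀ (text : String) (current : String), Dom_heuristic_type_py text current → Spec_heuristic_type_py text current (heuristic_type_py text current)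

-- ===== LEMMAS AND PROOFS =====

theorem pv_char_eq {c : Char} {n : Nat} (h : c.toNat = n) : c = Char.ofNat n := by
  subst h; exact (Char.ofNat_toNat c).symm

theorem pv_prefix_take4 {p cs : List Char} (hlen : p.length = 4) (h : p <+: cs.take 10) :
    cs.take 4 = p := by
  have h' : p <+: cs := h.trans (List.take_prefix 10 cs)
  have h2 := List.prefix_iff_eq_take.mp h'
  rw [hlen] at h2
  exact h2.symm

-- the core fact: scanning the 40 year strings equals parsing the first four chars
theorem pv_log_iff (cs : List Char) :
    ((PySem.List.pyRange 1990 2030 1).any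
        (fun y => PySem.Chars.startswith (cs.take 10) (PySem.Int.toChars y)) = true)
    ↔ (∃ a b c d, cs.take 4 = [a, b, c, d] ∧ PySem.Chars.strIsdigit [a, b, c, d] = true ∧
        1990 ≤ 1000 * ((a.toNat : Int) - 48) + 100 * ((b.toNat : Int) - 48)
              + 10 * ((c.toNat : Int) - 48) + ((d.toNat : Int) - 48) ∧
        1000 * ((a.toNat : Int) - 48) + 100 * ((b.toNat : Int) - 48)
              + 10 * ((c.toNat : Int) - 48) + ((d.toNat : Int) - 48) ≤ 2029) := by
  rw [List.any_eq_true]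
  constructor
  · rintro ⟨y, hy, hsw⟩
    rw [PySem.Chars.startswith_iff] at hsw
    fin_cases hy <;>
      exact ⟨_, _, _, _, pv_prefix_take4 (by decide) hsw, by decide, by decide, by decide⟩
  · rintro ⟨a, b, c, d, htake, hdig, hlo, hhi⟩
    simp only [PySem.Chars.strIsdigit, PySem.Chars.isdigit, List.all_cons, List.all_nil,
      Bool.and_eq_true, decide_eq_true_eq, List.isEmpty_cons, Bool.not_false, true_and,
      and_true] at hdig
    obtain ⟨⟨ha1, ha2⟩, ⟨hb1, hb2⟩, ⟨hc1, hc2⟩, hd1, hd2⟩ := hdig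
    have haN : 48 ≤ a.toNat := by simpa [Char.le_def, UInt32.le_iff_toNat_le] using ha1
    have haN' : a.toNat ≤ 57 := by simpa [Char.le_def, UInt32.le_iff_toNat_le] using ha2
    have hbN : 48 ≤ b.toNat := by simpa [Char.le_def, UInt32.le_iff_toNat_le] using hb1
    have hbN' : b.toNat ≤ 57 := by simpa [Char.le_def, UInt32.le_iff_toNat_le] using hb2
    have hcN : 48 ≤ c.toNat := by simpa [Char.le_def, UInt32.le_iff_toNat_le] using hc1
    have hcN' : c.toNat ≤ 57 := by simpa [Char.le_def, UInt32.le_iff_toNat_le] using hc2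
    have hdN : 48 ≤ d.toNat := by simpa [Char.le_def, UInt32.le_iff_toNat_le] using hd1
    have hdN' : d.toNat ≤ 57 := by simpa [Char.le_def, UInt32.le_iff_toNat_le] using hd2
    have htp : cs.take 10 = [a, b, c, d] ++ (cs.drop 4).take 6 := by
      have h10 : cs.take 10 = cs.take 4 ++ (cs.drop 4).take 6 := by
        rw [show (10 : Nat) = 4 + 6 from rfl, List.take_add]
      rw [h10, htake]
    -- it suffices that the year's decimal string is exactly [a, b, c, d]
    suffices key : PySem.Int.toChars (1000 * ((a.toNat : Int) - 48) + 100 * ((b.toNat : Int) - 48)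
        + 10 * ((c.toNat : Int) - 48) + ((d.toNat : Int) - 48)) = [a, b, c, d] by
      refine ⟨1000 * ((a.toNat : Int) - 48) + 100 * ((b.toNat : Int) - 48)
        + 10 * ((c.toNat : Int) - 48) + ((d.toNat : Int) - 48), ?_, ?_⟩
      · exact (PySem.List.mem_pyRange_iff_of_pos (by norm_num) _).mpr ⟨hlo, by omega, one_dvd _⟩
      · rw [PySem.Chars.startswith_iff, htp, key]
        exact List.prefix_append _ _
    obtain ⟨aN, haeq⟩ : ∃ n, a.toNat = n := ⟨_, rfl⟩
    obtain ⟨bN, hbeq⟩ : ∃ n, b.toNat = n := ⟨_, rfl⟩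
    obtain ⟨cN, hceq⟩ : ∃ n, c.toNat = n := ⟨_, rfl⟩
    obtain ⟨dN, hdeq⟩ : ∃ n, d.toNat = n := ⟨_, rfl⟩
    have ha3 : 48 ≤ aN := by omega
    have ha4 : aN ≤ 57 := by omega
    have hb3 : 48 ≤ bN := by omega
    have hb4 : bN ≤ 57 := by omega
    have hc3 : 48 ≤ cN := by omega
    have hc4 : cN ≤ 57 := by omega
    have hd3 : 48 ≤ dN := by omega
    have hd4 : dN ≤ 57 := by omega
    have hlo' : 1990 ≤ 1000 * ((aN : Int) - 48) + 100 * ((bN : Int) - 48)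
        + 10 * ((cN : Int) - 48) + ((dN : Int) - 48) := by omega
    have hhi' : 1000 * ((aN : Int) - 48) + 100 * ((bN : Int) - 48)
        + 10 * ((cN : Int) - 48) + ((dN : Int) - 48) ≤ 2029 := by omega
    obtain rfl := pv_char_eq haeq
    obtain rfl := pv_char_eq hbeq
    obtain rfl := pv_char_eq hceq
    obtain rfl := pv_char_eq hdeq
    rw [haeq, hbeq, hceq, hdeq]
    clear haeq hbeq hceq hdeq htake htp hlo hhi haN haN' hbN hbN' hcN hcN' hdN hdN' ha1 ha2 hb1 hb2 hc1 hc2 hd1 hd2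
    interval_cases aN <;> first
      | omega
      | (interval_cases bN <;> first
          | omega
          | (interval_cases cN <;> first
              | omega
              | (interval_cases dN <;> first | omega | decide)))

theorem pv_notlog_of_short {cs : List Char} (h : ∀ a b c d, cs.take 4 ≠ [a, b, c, d]) :
    ((PySem.List.pyRange 1990 2030 1).any
        (fun y => PySem.Chars.startswith (cs.take 10) (PySem.Int.toChars y))) = false := by
  rw [← Bool.not_eq_true, pv_log_iff]
  rintro ⟨a, b, c, d, ht, -⟩
  exact h a b c d ht

theorem heuristic_type_py_spec : Claim_equal_heuristic_type_py := by
  intro text current _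
  unfold Spec_heuristic_type_py heuristic_type_py heuristic_type_py_alt
  by_cases hcur : current = "text"
  · simp only [hcur, ne_eq, not_true_eq_false, if_false]
    by_cases h1 : (PySem.Str.isIn "SELECT" (PySem.Str.upper text)
        && PySem.Str.isIn "FROM" (PySem.Str.upper text)) = true
    · rw [if_pos h1, if_pos h1]
    · rw [if_neg h1, if_neg h1]
      by_cases h2 : (PySem.Str.isIn "INSERT" (PySem.Str.upper text)
          && PySem.Str.isIn "INTO" (PySem.Str.upper text)) = true
      · rw [if_pos h2, if_pos h2]
      · rw [if_neg h2, if_neg h2]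
        have hA : ((PySem.List.pyRange 1990 2030 1).any
            (fun y => PySem.Str.startswith (PySem.Str.slice text none (some 10)) (PySem.Int.toStr y)))
            = ((PySem.List.pyRange 1990 2030 1).any
            (fun y => PySem.Chars.startswith (text.toList.take 10) (PySem.Int.toChars y))) := by
          simp [PySem.Str.startswith_eq, PySem.Str.toList_slice, PySem.List.slice_to,
            PySem.Int.toList_toStr]
        have hsl : (PySem.Str.slice text none (some 4)).toList = text.toList.take 4 := by
          simp [PySem.List.slice_to]
        rw [hA, hsl]
        rcases h4 : text.toList.take 4 with _ | ⟨a, _ | ⟨b, _ | ⟨c, _ | ⟨d, _ | ⟨e, t⟩⟩⟩⟩⟩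
        · rw [pv_notlog_of_short (by simp [h4])]; rfl
        · rw [pv_notlog_of_short (by simp [h4])]; rfl
        · rw [pv_notlog_of_short (by simp [h4])]; rfl
        · rw [pv_notlog_of_short (by simp [h4])]; rfl
        · -- the four-character case
          by_cases hdig : PySem.Chars.strIsdigit [a, b, c, d] = true
          · by_cases hyr : 1990 ≤ 1000 * ((a.toNat : Int) - 48) + 100 * ((b.toNat : Int) - 48)
                + 10 * ((c.toNat : Int) - 48) + ((d.toNat : Int) - 48) ∧
                1000 * ((a.toNat : Int) - 48) + 100 * ((b.toNat : Int) - 48)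
                + 10 * ((c.toNat : Int) - 48) + ((d.toNat : Int) - 48) ≤ 2029
            · have hc : ((PySem.List.pyRange 1990 2030 1).any
                  (fun y => PySem.Chars.startswith (text.toList.take 10) (PySem.Int.toChars y))) = true :=
                (pv_log_iff _).mpr ⟨a, b, c, d, h4, hdig, hyr.1, hyr.2⟩
              simp [hc, hdig, hyr]
            · have hc : ((PySem.List.pyRange 1990 2030 1).any
                  (fun y => PySem.Chars.startswith (text.toList.take 10) (PySem.Int.toChars y))) = false := by
                rw [← Bool.not_eq_true, pv_log_iff]
                rintro ⟨a', b', c', d', ht', hdig', hlo', hhi'⟩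
                rw [h4] at ht'
                obtain ⟨rfl, rfl, rfl, rfl⟩ : a = a' ∧ b = b' ∧ c = c' ∧ d = d' := by
                  simpa using ht'
                exact hyr ⟨hlo', hhi'⟩
              simp [hc, hdig, hyr]
          · have hc : ((PySem.List.pyRange 1990 2030 1).any
                (fun y => PySem.Chars.startswith (text.toList.take 10) (PySem.Int.toChars y))) = false := by
              rw [← Bool.not_eq_true, pv_log_iff]
              rintro ⟨a', b', c', d', ht', hdig', -, -⟩
              rw [h4] at ht'
              obtain ⟨rfl, rfl, rfl, rfl⟩ : a = a' ∧ b = b' ∧ c = c' ∧ d = d' := by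
                simpa using ht'
              exact hdig hdig'
            simp [hc, hdig]
        · -- a take of length 4 cannot have five or more elements
          exfalso
          have hl := List.length_take_le 4 text.toList
          rw [h4] at hl
          simp at hl
          omega
  · simp [hcur]
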